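-- pv_equiv track=rewrite | github.com/LEUNGUU/data-structure-algorithms-python | Python-Primer/exercises/r114.py | pairsOdd2
-- ===== SOURCE A (Python) =====
-- def pairsOdd2(a: list) -> list:
--     res = []
--     for index in range(0, len(a)):
--         if (index + 1) < len(a):
--             res.append(
--                 [
--                     (a[index], item)
--                     for item in a[index + 1 :]
--                     if a[index] * item % 2 != 0
--                 ]
--             )
--     return res
-- ===== SOURCE B (Python) =====
-- def pairsOdd2(a: list) -> list:
--     # One right-to-left pass: a product is odd iff both factors are odd, so each
--     # group is either empty (even first element) or the odd elements to its right.
--     groups = []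
--     odds = []  # odd elements already seen, in left-to-right order
--     for x in reversed(a):
--         if x % 2 != 0:
--             groups.append([(x, y) for y in odds])
--             odds = [x] + odds
--         else:
--             groups.append([])
--     groups.reverse()
--     return groups[:-1]
-- ===== Notes on version B (the rewrite author's own statement) =====
-- stated objective: faster
-- what changed: Instead of rescanning and parity-testing the whole suffix for every index, B makes one right-to-left pass maintaining the list of odd elements seen so far: a product is odd iff both factors are odd, so each group is empty for an even first element and otherwise pairs it with the precomputed odd successors.
import Mathlib
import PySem

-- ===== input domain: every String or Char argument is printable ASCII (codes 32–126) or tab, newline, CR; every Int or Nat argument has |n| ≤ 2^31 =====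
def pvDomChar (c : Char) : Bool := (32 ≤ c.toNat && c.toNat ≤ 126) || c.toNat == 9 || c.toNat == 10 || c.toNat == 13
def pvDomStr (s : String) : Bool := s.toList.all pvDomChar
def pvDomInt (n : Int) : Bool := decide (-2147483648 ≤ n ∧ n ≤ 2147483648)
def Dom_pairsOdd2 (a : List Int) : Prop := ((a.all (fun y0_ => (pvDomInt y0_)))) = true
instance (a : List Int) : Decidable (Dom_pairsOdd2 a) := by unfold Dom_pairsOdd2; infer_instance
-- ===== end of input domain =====

-- B replaces A's per-index suffix rescan by one right-to-left pass over the list that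
-- maintains the odd elements seen so far (odd product = both factors odd): faster.

-- ===== PORT A =====
def pairsOdd2 (a : List Int) : List (List (Int × Int)) :=
  (PySem.List.pyRange 0 (a.length : Int) 1).foldl
    (fun res index =>
      if index + 1 < (a.length : Int) then
        res ++ [((PySem.List.slice a (some (index + 1)) none).filter
                   (fun item => PySem.Int.mod (PySem.List.pyGetD a index 0 * item) 2 != 0)).map
                 (fun item => (PySem.List.pyGetD a index 0, item))]
      else res)
    []

-- ===== PORT B =====
def pairsOdd2_alt (a : List Int) : List (List (Int × Int)) :=
  let st := a.reverse.foldl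
    (fun (st : List (List (Int × Int)) × List Int) x =>
      if PySem.Int.mod x 2 != 0 then
        (st.1 ++ [st.2.map (fun y => (x, y))], [x] ++ st.2)
      else
        (st.1 ++ [([] : List (Int × Int))], st.2))
    ([], [])
  PySem.List.slice st.1.reverse none (some (-1))

-- ===== PRECONDITION & SPEC =====
def Spec_pairsOdd2 (a : List Int) (out : List (List (Int × Int))) : Prop := out = pairsOdd2_alt a
instance (a : List Int) (out : List (List (Int × Int))) : Decidable (Spec_pairsOdd2 a out) := by unfold Spec_pairsOdd2; infer_instance

-- ===== CLAIM (what is proved, stated in full; the proofs are below) =====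
def Claim_equal_pairsOdd2 : Prop := ∀ (a : List Int), Dom_pairsOdd2 a → Spec_pairsOdd2 a (pairsOdd2 a)

-- ===== LEMMAS AND PROOFS =====

-- common structural description: the list of groups, one per index (B drops the last one)
def oddsOf (xs : List Int) : List Int := xs.filter (fun y => PySem.Int.mod y 2 != 0)

def gB (x : Int) (xs : List Int) : List (Int × Int) :=
  if PySem.Int.mod x 2 != 0 then (oddsOf xs).map (fun y => (x, y)) else []

def hGroups : List Int → List (List (Int × Int))
  | [] => []
  | x :: xs => gB x xs :: hGroups xs

-- A's group body at index i
def gBody (a : List Int) (i : Int) : List (Int × Int) :=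
  ((PySem.List.slice a (some (i + 1)) none).filter
    (fun item => PySem.Int.mod (PySem.List.pyGetD a i 0 * item) 2 != 0)).map
   (fun item => (PySem.List.pyGetD a i 0, item))

lemma mod_two_ne (x : Int) : (PySem.Int.mod x 2 != 0) = decide (x % 2 = 1) := by
  rw [PySem.Int.mod_eq_emod_of_pos (by omega)]
  rcases Int.emod_two_eq x with h | h <;> simp [h]

lemma filter_parity (x : Int) (xs : List Int) :
    xs.filter (fun y => PySem.Int.mod (x * y) 2 != 0) =
      if PySem.Int.mod x 2 != 0 then oddsOf xs else [] := by
  simp only [mod_two_ne, oddsOf]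
  rcases Int.emod_two_eq x with hx | hx <;> simp [hx]
  · exact fun a _ => (Int.dvd_of_emod_eq_zero hx).mul_right a
  · apply List.filter_congr
    intro y _
    rcases Int.emod_two_eq y with hy | hy <;> simp [Int.mul_emod, hx, hy]

lemma alt_state (a : List Int) :
    a.reverse.foldl
      (fun (st : List (List (Int × Int)) × List Int) x =>
        if PySem.Int.mod x 2 != 0 then
          (st.1 ++ [st.2.map (fun y => (x, y))], [x] ++ st.2)
        else
          (st.1 ++ [([] : List (Int × Int))], st.2))
      ([], []) = ((hGroups a).reverse, oddsOf a) := by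
  rw [List.foldl_reverse]
  induction a with
  | nil => simp [hGroups, oddsOf]
  | cons x xs ih =>
    rw [List.foldr_cons, ih]
    simp only [hGroups, gB, oddsOf, List.filter_cons, mod_two_ne]
    rcases Int.emod_two_eq x with hx | hx <;> simp [hx]

lemma alt_eq (a : List Int) : pairsOdd2_alt a = (hGroups a).dropLast := by
  unfold pairsOdd2_alt
  rw [alt_state]
  simp [PySem.List.slice_to_neg_one]

lemma gBody_zero (x : Int) (xs : List Int) : gBody (x :: xs) 0 = gB x xs := by
  unfold gBody
  rw [show (0 : Int) + 1 = 1 by ring]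
  rw [PySem.List.slice_from_one]
  simp only [PySem.List.pyGetD_zero_cons, List.tail_cons]
  rw [filter_parity]
  unfold gB
  split <;> simp

lemma gBody_shift (x : Int) (xs : List Int) (k : Nat) :
    gBody (x :: xs) ((k : Int) + 1) = gBody xs (k : Int) := by
  unfold gBody
  have h1 : PySem.List.pyGetD (x :: xs) ((k : Int) + 1) 0 = PySem.List.pyGetD xs (k : Int) 0 := by
    rw [show ((k : Int) + 1) = ((k + 1 : Nat) : Int) by push_cast; ring]
    rw [PySem.List.pyGetD_natCast, PySem.List.pyGetD_natCast]
    rfl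
  have h2 : PySem.List.slice (x :: xs) (some ((k : Int) + 1 + 1)) none
      = PySem.List.slice xs (some ((k : Int) + 1)) none := by
    rw [show ((k : Int) + 1 + 1) = ((k + 2 : Nat) : Int) by push_cast; ring,
        show ((k : Int) + 1) = ((k + 1 : Nat) : Int) by push_cast; ring]
    rw [PySem.List.slice_from_natCast, PySem.List.slice_from_natCast]
    rfl
  rw [h1, h2]

lemma hGroups_cons_ne_nil (y : Int) (ys : List Int) : hGroups (y :: ys) ≠ [] := by
  simp [hGroups]

lemma filter_range (n : Nat) :
    (List.range n).filter (fun (k : Nat) => decide (((k : Int)) + 1 < (n : Int)))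
      = List.range (n - 1) := by
  cases n with
  | zero => simp
  | succ m =>
    rw [List.range_succ, List.filter_append]
    have h1 : (List.range m).filter (fun (k : Nat) => decide (((k : Int)) + 1 < ((m + 1 : Nat) : Int)))
        = List.range m := by
      apply List.filter_eq_self.mpr
      intro k hk
      simp only [List.mem_range] at hk
      simp only [decide_eq_true_eq]
      push_cast
      omega
    have h2 : ([m].filter (fun (k : Nat) => decide (((k : Int)) + 1 < ((m + 1 : Nat) : Int)))) = [] := by
      simp
    rw [h1, h2]
    simp

lemma core : ∀ a : List Int,
    (List.range (a.length - 1)).map (fun (k : Nat) => gBody a (k : Int)) = (hGroups a).dropLast := by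
  intro a
  induction a with
  | nil => simp [hGroups]
  | cons x xs ih =>
    cases xs with
    | nil => simp [hGroups]
    | cons y ys =>
      show (List.range (ys.length + 1)).map (fun (k : Nat) => gBody (x :: y :: ys) (k : Int))
        = (hGroups (x :: y :: ys)).dropLast
      rw [List.range_succ_eq_map, List.map_cons, List.map_map]
      have hshift : ∀ k : Nat,
          ((fun (k : Nat) => gBody (x :: y :: ys) (k : Int)) ∘ Nat.succ) k
            = gBody (y :: ys) (k : Int) := by
        intro k
        show gBody (x :: y :: ys) ((k + 1 : Nat) : Int) = gBody (y :: ys) (k : Int)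
        rw [show ((k + 1 : Nat) : Int) = ((k : Int) + 1) by push_cast; ring]
        exact gBody_shift x (y :: ys) k
      rw [List.map_congr_left (fun k _ => hshift k)]
      have hih : (List.range ys.length).map (fun (k : Nat) => gBody (y :: ys) (k : Int))
          = (hGroups (y :: ys)).dropLast := by
        have := ih
        simpa using this
      rw [hih]
      show gBody (x :: y :: ys) ((0 : Nat) : Int) :: (hGroups (y :: ys)).dropLast
        = (gB x (y :: ys) :: hGroups (y :: ys)).dropLast
      rw [List.dropLast_cons_of_ne_nil (hGroups_cons_ne_nil y ys)]
      rw [show ((0 : Nat) : Int) = (0 : Int) from rfl, gBody_zero]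

lemma A_eq (a : List Int) : pairsOdd2 a = (hGroups a).dropLast := by
  unfold pairsOdd2
  rw [PySem.List.foldl_append_ite (p := fun index => index + 1 < (a.length : Int))
      (f := fun index =>
        ((PySem.List.slice a (some (index + 1)) none).filter
          (fun item => PySem.Int.mod (PySem.List.pyGetD a index 0 * item) 2 != 0)).map
         (fun item => (PySem.List.pyGetD a index 0, item)))]
  rw [List.nil_append, PySem.List.pyRange_zero_natCast, List.filter_map, List.map_map]
  simp only [Function.comp_def]
  rw [filter_range]
  exact core a

-- ===== VERDICT (by name: the statement is the Claim_ definition above) =====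
theorem pairsOdd2_spec : Claim_equal_pairsOdd2 := by
  intro a _
  unfold Spec_pairsOdd2
  rw [A_eq, alt_eq]
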